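-- pv_equiv track=rewrite | github.com/analytics360-projects/Vulcan | app.py | detect_offensive_content
-- ===== SOURCE A (Python) =====
-- import string
--
-- SPANISH_OFFENSIVE_WORDS = [
--     'puta', 'puto', 'pendejo', 'pendeja', 'culero', 'culera', 'joto', 'jota',
--     'chinga', 'verga', 'cabron', 'cabrona', 'idiota', 'estupido', 'estupida',
--     'imbecil', 'pinche', 'mierda', 'cagada', 'marica', 'maricon', 'perra',
--     'zorra', 'panocha', 'coño', 'culo', 'chingada', 'chingado', 'hijo de puta',
--     'puto el que lo lea', 'chinga tu madre', 'chinga a tu madre'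
-- ]
--
-- def detect_offensive_content(text: str) -> bool:
--     """Detect if text contains offensive content in Spanish"""
--     text_lower = text.lower()
--
--     # Remove punctuation and split into words
--     translator = str.maketrans('', '', string.punctuation)
--     text_no_punctuation = text_lower.translate(translator)
--     words = text_no_punctuation.split()
--
--     # Check for offensive words
--     for offensive_word in SPANISH_OFFENSIVE_WORDS:
--         # Handle multi-word offensive phrases
--         if ' ' in offensive_word:
--             if offensive_word in text_lower:
--                 return True
--         # Handle single offensive words
--         elif offensive_word in words:
--             return True
--
--     return False
-- ===== SOURCE B (Python) =====
-- import string
--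
-- SPANISH_OFFENSIVE_WORDS = [
--     'puta', 'puto', 'pendejo', 'pendeja', 'culero', 'culera', 'joto', 'jota',
--     'chinga', 'verga', 'cabron', 'cabrona', 'idiota', 'estupido', 'estupida',
--     'imbecil', 'pinche', 'mierda', 'cagada', 'marica', 'maricon', 'perra',
--     'zorra', 'panocha', 'coño', 'culo', 'chingada', 'chingado', 'hijo de puta',
--     'puto el que lo lea', 'chinga tu madre', 'chinga a tu madre'
-- ]
--
-- # Precomputed once: the single-word vocabulary and the multi-word phrases.
-- _SINGLE_WORDS = frozenset(w for w in SPANISH_OFFENSIVE_WORDS if ' ' not in w)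
-- _PHRASES = [w for w in SPANISH_OFFENSIVE_WORDS if ' ' in w]
-- _PUNCT = set(string.punctuation)
--
-- def detect_offensive_content(text: str) -> bool:
--     """Detect if text contains offensive content in Spanish.
--
--     Text-driven matcher: instead of iterating over the keyword list and
--     searching the text for each entry (as a keyword-driven scan would),
--     walk the TEXT itself: each of its tokens is looked up in the single-word
--     vocabulary, and each position of the lowered text is tested as a possible
--     start of an offensive phrase (sliding-window prefix matching).
--     """
--     text_lower = text.lower()
--     for token in ''.join(c for c in text_lower if c not in _PUNCT).split():
--         if token in _SINGLE_WORDS: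
--             return True
--     for i in range(len(text_lower) + 1):
--         for p in _PHRASES:
--             if text_lower.startswith(p, i):
--                 return True
--     return False
-- ===== Notes on version B (the rewrite author's own statement) =====
-- stated objective: alternative
-- what changed: Reverses the traversal: instead of A's single loop over the keyword list searching the text for each entry, B walks the text itself - each token of the cleaned text is looked up in the single-word vocabulary, and each position of the lowered text is tested by sliding-window prefix matching against the phrase list.
import Mathlib
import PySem

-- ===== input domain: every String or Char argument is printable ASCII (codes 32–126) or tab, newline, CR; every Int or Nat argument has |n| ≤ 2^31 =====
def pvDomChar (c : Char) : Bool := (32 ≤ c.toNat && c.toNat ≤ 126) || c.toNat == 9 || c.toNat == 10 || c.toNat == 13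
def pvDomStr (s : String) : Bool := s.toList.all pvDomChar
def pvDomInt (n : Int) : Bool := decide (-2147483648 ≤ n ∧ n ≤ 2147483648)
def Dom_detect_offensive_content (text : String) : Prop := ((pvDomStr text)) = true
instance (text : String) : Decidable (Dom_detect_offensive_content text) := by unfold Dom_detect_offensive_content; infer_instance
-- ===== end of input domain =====

-- B reverses the traversal: it walks the text (token lookups + per-position phrase prefix matching)
-- instead of A's loop over the keyword list; alternative decomposition, same observable result.

-- ===== PORT A =====
-- string.punctuation
def pvPunct : List Char := "!\"#$%&'()*+,-./:;<=>?@[\\]^_`{|}~".toList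

def pvSpanishOffensiveWords : List (List Char) :=
  (["puta", "puto", "pendejo", "pendeja", "culero", "culera", "joto", "jota",
    "chinga", "verga", "cabron", "cabrona", "idiota", "estupido", "estupida",
    "imbecil", "pinche", "mierda", "cagada", "marica", "maricon", "perra",
    "zorra", "panocha", "coño", "culo", "chingada", "chingado", "hijo de puta",
    "puto el que lo lea", "chinga tu madre", "chinga a tu madre"] : List String).map String.toList

-- A's for-loop with early returns, as structural recursion over the offensive list
def pvLoopA (ws : List (List Char)) (textLower : List Char) (words : List (List Char)) : Bool :=
  match ws with
  | [] => false
  | w :: rest =>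
    if PySem.Chars.isIn [' '] w then
      if PySem.Chars.isIn w textLower then true else pvLoopA rest textLower words
    else if words.contains w then true else pvLoopA rest textLower words

def detect_offensive_content (text : String) : Bool :=
  let textLower := PySem.Chars.lower text.toList
  -- text_lower.translate(maketrans('', '', punctuation)) deletes exactly the punctuation chars (exact: deletion-only translate)
  let textNoPunctuation := textLower.filter (fun c => !(pvPunct.contains c))
  let words := PySem.Chars.split₀ textNoPunctuation
  pvLoopA pvSpanishOffensiveWords textLower words

-- ===== PORT B =====
def pvSingleWords : List (List Char) :=
  pvSpanishOffensiveWords.filter (fun w => !(PySem.Chars.isIn [' '] w))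
def pvPhrases : List (List Char) :=
  pvSpanishOffensiveWords.filter (fun w => PySem.Chars.isIn [' '] w)

-- B's first loop: walk the text's tokens, looking each one up in the vocabulary
def pvScanTokens (tokens : List (List Char)) : Bool :=
  match tokens with
  | [] => false
  | t :: rest => if pvSingleWords.contains t then true else pvScanTokens rest

def detect_offensive_content_alt (text : String) : Bool :=
  let textLower := PySem.Chars.lower text.toList
  if pvScanTokens (PySem.Chars.split₀ (textLower.filter (fun c => !(pvPunct.contains c)))) then true
  else
    -- B's second loop: for i in range(len+1), does some phrase start at position i?
    -- (text_lower.startswith(p, i) = p is a prefix of text_lower[i:])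
    (List.range (textLower.length + 1)).any
      (fun i => pvPhrases.any (fun p => p.isPrefixOf (textLower.drop i)))

-- ===== PRECONDITION & SPEC =====
def Spec_detect_offensive_content (text : String) (out : Bool) : Prop := out = detect_offensive_content_alt text
instance (text : String) (out : Bool) : Decidable (Spec_detect_offensive_content text out) := by unfold Spec_detect_offensive_content; infer_instance

-- ===== CLAIM (what is proved, stated in full; the proofs are below) =====
def Claim_equal_detect_offensive_content : Prop := ∀ (text : String), Dom_detect_offensive_content text → Spec_detect_offensive_content text (detect_offensive_content text)

-- ===== LEMMAS AND PROOFS =====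

-- A's loop is an 'any' of the per-entry branch
theorem pvLoopA_eq_any (ws : List (List Char)) (tl : List Char) (words : List (List Char)) :
    pvLoopA ws tl words
      = ws.any (fun w => if PySem.Chars.isIn [' '] w then PySem.Chars.isIn w tl else words.contains w) := by
  induction ws with
  | nil => rfl
  | cons w rest ih =>
    simp only [pvLoopA, List.any_cons]
    by_cases h : PySem.Chars.isIn [' '] w = true <;> simp [h, ih]

-- an 'any' of an if-branch splits into the two filtered 'any's
theorem any_ite_split {α : Type} (ws : List α) (p f g : α → Bool) :
    ws.any (fun w => if p w then f w else g w)
      = (((ws.filter (fun w => !(p w))).any g) || ((ws.filter p).any f)) := by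
  induction ws with
  | nil => rfl
  | cons w rest ih =>
    by_cases h : p w = true <;>
      simp [h, ih, Bool.or_assoc, Bool.or_left_comm]

-- B's token walk equals A's keyword-side membership 'any' (both = nonempty intersection)
theorem pvScanTokens_eq (tokens : List (List Char)) :
    pvScanTokens tokens = pvSingleWords.any (fun w => tokens.contains w) := by
  induction tokens with
  | nil => simp [pvScanTokens]
  | cons t rest ih =>
    simp only [pvScanTokens, ih]
    by_cases h : pvSingleWords.contains t = true
    · simp only [if_pos h]
      exact (List.any_eq_true.mpr
        ⟨t, List.contains_iff_mem.mp h, List.contains_iff_mem.mpr List.mem_cons_self⟩).symm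
    · simp only [if_neg h]
      apply Bool.coe_iff_coe.mp
      simp only [List.any_eq_true, List.contains_iff_mem, List.mem_cons]
      constructor
      · rintro ⟨w, hw, hm⟩; exact ⟨w, hw, Or.inr hm⟩
      · rintro ⟨w, hw, hm | hm⟩
        · exact absurd (hm ▸ List.contains_iff_mem.mpr hw) (by simpa using h)
        · exact ⟨w, hw, hm⟩

-- B's position scan equals A's per-phrase substring 'any'
theorem pvScanPositions_eq (tl : List Char) :
    ((List.range (tl.length + 1)).any
      (fun i => pvPhrases.any (fun p => p.isPrefixOf (tl.drop i))))
      = pvPhrases.any (fun p => PySem.Chars.isIn p tl) := by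
  apply Bool.coe_iff_coe.mp
  simp only [List.any_eq_true, List.mem_range, List.isPrefixOf_iff_prefix]
  constructor
  · rintro ⟨i, _, p, hp, hpre⟩
    exact ⟨p, hp, (PySem.Chars.exists_prefix_drop_iff_isIn _ _).mp ⟨i, hpre⟩⟩
  · rintro ⟨p, hp, hin⟩
    obtain ⟨j, hpre⟩ := (PySem.Chars.exists_prefix_drop_iff_isIn _ _).mpr hin
    by_cases hj : j < tl.length + 1
    · exact ⟨j, hj, p, hp, hpre⟩
    · refine ⟨tl.length, Nat.lt_succ_self _, p, hp, ?_⟩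
      rw [List.drop_length]
      rwa [List.drop_eq_nil_of_le (by omega)] at hpre

-- ===== VERDICT (by name: the statement is the Claim_ definition above) =====
theorem detect_offensive_content_spec : Claim_equal_detect_offensive_content := by
  intro text _
  unfold Spec_detect_offensive_content detect_offensive_content detect_offensive_content_alt
  simp only [pvLoopA_eq_any, any_ite_split, pvScanTokens_eq, pvScanPositions_eq]
  rw [show (pvSpanishOffensiveWords.filter (fun w => !(PySem.Chars.isIn [' '] w))) = pvSingleWords from rfl,
      show (pvSpanishOffensiveWords.filter (fun w => PySem.Chars.isIn [' '] w)) = pvPhrases from rfl]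
  cases h : pvSingleWords.any (fun w => (PySem.Chars.split₀ ((PySem.Chars.lower text.toList).filter (fun c => !(pvPunct.contains c)))).contains w) <;> simp
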